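-- pv_equiv track=rewrite | github.com/pythongus/metabob | test/test_maximize.py | maximize
-- ===== SOURCE A (Python) =====
-- def maximize(m, sets):
--
--     def _calc(elem, set_, accum):
--         for set_elem in set_:
--             accum.append(elem + set_elem)
--         return accum
--
--     def calc(elems, set_, accum):
--         for elem in elems:
--             accum = _calc(elem, set_, accum)
--         return accum
--
--     def calculate(elems, sets, accum):
--         if not sets and not accum:
--             return elems
--         elif not elems or not sets:
--             return accum
--         accum = calc(elems, sets[0], accum)
--         return calculate(accum, sets[1:], [])
--
--     nums = calculate(sets[0], sets[1:], [])
--     return max([num % m for num in nums])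
-- ===== SOURCE B (Python) =====
-- def maximize(m, sets):
--     residues = {e % m for e in sets[0]}
--     for s in sets[1:]:
--         residues = {(r + e) % m for r in residues for e in s}
--     return max(residues)
-- ===== Notes on version B (the rewrite author's own statement) =====
-- stated objective: faster
-- what changed: A materialises the full cross-product list of all sums (one per choice from each set) and takes max of their residues; B runs a DP over the set of reachable residues mod m, keeping at most |m| states per step.
import Mathlib
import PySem

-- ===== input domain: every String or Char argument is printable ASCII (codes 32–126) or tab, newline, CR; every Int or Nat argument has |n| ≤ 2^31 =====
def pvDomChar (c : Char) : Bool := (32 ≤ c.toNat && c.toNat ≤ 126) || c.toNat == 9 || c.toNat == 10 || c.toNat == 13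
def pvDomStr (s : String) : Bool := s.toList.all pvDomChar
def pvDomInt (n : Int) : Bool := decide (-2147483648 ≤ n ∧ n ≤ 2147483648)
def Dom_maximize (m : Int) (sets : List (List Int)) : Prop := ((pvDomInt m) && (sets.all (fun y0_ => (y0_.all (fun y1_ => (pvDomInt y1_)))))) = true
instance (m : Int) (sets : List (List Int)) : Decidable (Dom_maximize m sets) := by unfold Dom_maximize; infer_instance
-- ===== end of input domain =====

-- B replaces A's cross-product list of all sums (exponential in the number of sets) by a DP over the
-- set of reachable residues mod m (at most |m| states per step); equivalence of the RETURN value is proved.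

-- ===== PORT A =====
-- A's helper _calc: append elem+set_elem for each set_elem
def maximizeCalcElem (elem : Int) (set_ : List Int) (accum : List Int) : List Int :=
  set_.foldl (fun acc se => acc ++ [elem + se]) accum

-- A's helper calc
def maximizeCalc (elems : List Int) (set_ : List Int) (accum : List Int) : List Int :=
  elems.foldl (fun acc e => maximizeCalcElem e set_ acc) accum

-- A's helper calculate (structural recursion on sets, as Python recurses on sets[1:])
def maximizeCalculate : List Int → List (List Int) → List Int → List Int
  | elems, [], accum => if accum = [] then elems else accum
  | elems, s :: rest, accum =>
    if elems = [] then accum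
    else maximizeCalculate (maximizeCalc elems s accum) rest []

def maximize (m : Int) (sets : List (List Int)) : Int :=
  match sets with
  | [] => 0  -- Python raises IndexError on sets[0]; excluded by Pre_
  | s0 :: rest =>
    let nums := maximizeCalculate s0 rest []
    -- max([num % m for num in nums]); ValueError on empty excluded by Pre_
    (PySem.List.max? (nums.map (fun num => PySem.Int.mod num m)) (fun y => y)).getD 0

-- ===== PORT B =====
def maximize_alt (m : Int) (sets : List (List Int)) : Int :=
  match sets with
  | [] => 0  -- Python raises IndexError on sets[0]; excluded by Pre_
  | s0 :: rest =>
    let residues : PySem.Set Int := PySem.Set.ofList (s0.map (fun e => PySem.Int.mod e m))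
    let final := rest.foldl (fun rs s =>
      PySem.Set.ofList (rs.flatMap (fun r => s.map (fun e => PySem.Int.mod (r + e) m)))) residues
    (PySem.List.max? final (fun y => y)).getD 0

-- ===== PRECONDITION & SPEC =====
-- Pre_ excludes exactly the inputs where A raises: m = 0 (ZeroDivisionError), sets empty
-- (IndexError on sets[0]), or some inner set empty (max([]) ValueError).
def Pre_maximize (m : Int) (sets : List (List Int)) : Prop :=
  m ≠ 0 ∧ sets ≠ [] ∧ ∀ s ∈ sets, s ≠ []
instance (m : Int) (sets : List (List Int)) : Decidable (Pre_maximize m sets) := by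
  unfold Pre_maximize; infer_instance

def pvWitness_maximize : Int × List (List Int) := (7, [[1, 2], [3, 10]])

def Spec_maximize (m : Int) (sets : List (List Int)) (out : Int) : Prop := out = maximize_alt m sets
instance (m : Int) (sets : List (List Int)) (out : Int) : Decidable (Spec_maximize m sets out) := by unfold Spec_maximize; infer_instance

-- ===== CLAIM (what is proved, stated in full; the proofs are below) =====
def Claim_equal_maximize : Prop := ∀ (m : Int) (sets : List (List Int)), Dom_maximize m sets → Pre_maximize m sets → Spec_maximize m sets (maximize m sets)

-- ===== LEMMAS AND PROOFS =====

-- abstract one cross-sum step of A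
def sumsStep (elems s : List Int) : List Int :=
  elems.flatMap (fun e => s.map (fun se => e + se))

theorem maximizeCalcElem_eq (e : Int) (s acc : List Int) :
    maximizeCalcElem e s acc = acc ++ s.map (fun se => e + se) := by
  unfold maximizeCalcElem
  exact PySem.List.foldl_append_singleton_eq_map (fun se => e + se) s acc

theorem maximizeCalc_eq (elems s acc : List Int) :
    maximizeCalc elems s acc = acc ++ sumsStep elems s := by
  induction elems generalizing acc with
  | nil => simp [maximizeCalc, sumsStep]
  | cons e t ih =>
    have ih' := ih (maximizeCalcElem e s acc)
    simp only [maximizeCalc, List.foldl_cons] at ih' ⊢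
    rw [ih', maximizeCalcElem_eq]
    simp [sumsStep, List.append_assoc]

theorem sumsStep_ne_nil {elems s : List Int} (he : elems ≠ []) (hs : s ≠ []) :
    sumsStep elems s ≠ [] := by
  cases elems with
  | nil => exact absurd rfl he
  | cons e t =>
    cases s with
    | nil => exact absurd rfl hs
    | cons x u => simp [sumsStep]

theorem maximizeCalculate_eq (ss : List (List Int)) (elems : List Int)
    (he : elems ≠ []) (hs : ∀ s ∈ ss, s ≠ []) :
    maximizeCalculate elems ss [] = ss.foldl sumsStep elems := by
  induction ss generalizing elems with
  | nil => simp [maximizeCalculate]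
  | cons s rest ih =>
    simp only [maximizeCalculate, if_neg he, List.foldl_cons]
    rw [maximizeCalc_eq, List.nil_append]
    exact ih (sumsStep elems s)
      (sumsStep_ne_nil he (hs s (List.mem_cons_self)))
      (fun t ht => hs t (List.mem_cons_of_mem _ ht))

-- mod m is invariant under adding a multiple of m (Python floor mod, any m ≠ 0)
theorem pymod_congr {m a b : Int} (hm : m ≠ 0) (h : m ∣ a - b) :
    PySem.Int.mod a m = PySem.Int.mod b m := by
  have ha := PySem.Int.floordiv_mul_add_mod a m
  have hb := PySem.Int.floordiv_mul_add_mod b m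
  obtain ⟨c, hc⟩ := h
  have hK : PySem.Int.mod a m - PySem.Int.mod b m =
      m * (c - PySem.Int.floordiv a m + PySem.Int.floordiv b m) := by
    ring_nf
    ring_nf at ha hb hc
    linarith
  set K := c - PySem.Int.floordiv a m + PySem.Int.floordiv b m with hKdef
  rcases lt_or_gt_of_ne hm with hneg | hpos
  · obtain ⟨h1, h2⟩ := PySem.Int.mod_neg_bounds a hneg
    obtain ⟨h3, h4⟩ := PySem.Int.mod_neg_bounds b hneg
    have hK0 : K = 0 := by
      rcases lt_trichotomy K 0 with hlt | h0 | hgt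
      · exfalso; nlinarith
      · exact h0
      · exfalso; nlinarith
    rw [hK0, mul_zero] at hK
    omega
  · have h1 := PySem.Int.mod_nonneg a hpos
    have h2 := PySem.Int.mod_lt a hpos
    have h3 := PySem.Int.mod_nonneg b hpos
    have h4 := PySem.Int.mod_lt b hpos
    have hK0 : K = 0 := by
      rcases lt_trichotomy K 0 with hlt | h0 | hgt
      · exfalso; nlinarith
      · exact h0
      · exfalso; nlinarith
    rw [hK0, mul_zero] at hK
    omega

theorem pymod_add_left {m n e : Int} (hm : m ≠ 0) :
    PySem.Int.mod (PySem.Int.mod n m + e) m = PySem.Int.mod (n + e) m := by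
  apply pymod_congr hm
  have h := PySem.Int.floordiv_mul_add_mod n m
  exact ⟨-(PySem.Int.floordiv n m), by linarith⟩

-- B's DP step
def resStep (m : Int) (rs : PySem.Set Int) (s : List Int) : PySem.Set Int :=
  PySem.Set.ofList (rs.flatMap (fun r => s.map (fun e => PySem.Int.mod (r + e) m)))

-- invariant: B's residue set holds exactly the residues of A's sum list
theorem mem_resFold {m : Int} (hm : m ≠ 0) (ss : List (List Int))
    (R : PySem.Set Int) (A : List Int)
    (hR : ∀ x, x ∈ R ↔ ∃ n ∈ A, x = PySem.Int.mod n m) :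
    ∀ x, x ∈ ss.foldl (resStep m) R ↔ ∃ n ∈ ss.foldl sumsStep A, x = PySem.Int.mod n m := by
  induction ss generalizing R A with
  | nil => exact hR
  | cons s rest ih =>
    simp only [List.foldl_cons]
    apply ih
    intro x
    simp only [resStep, PySem.Set.mem_ofList, List.mem_flatMap, List.mem_map, sumsStep]
    constructor
    · rintro ⟨r, hr, e, he, rfl⟩
      obtain ⟨n, hn, rfl⟩ := (hR r).mp hr
      exact ⟨n + e, ⟨n, hn, e, he, rfl⟩, pymod_add_left hm⟩
    · rintro ⟨_, ⟨n, hn, e, he, rfl⟩, rfl⟩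
      exact ⟨PySem.Int.mod n m, (hR _).mpr ⟨n, hn, rfl⟩, e, he, pymod_add_left hm⟩

-- same members (Int, identity key) ⇒ same max?
theorem max?_ext {xs ys : List Int} (h : ∀ x, x ∈ xs ↔ x ∈ ys) :
    PySem.List.max? xs (fun y => y) = PySem.List.max? ys (fun y => y) := by
  rcases hx : PySem.List.max? xs (fun y => y) with _ | a
  · rw [PySem.List.max?_eq_none_iff] at hx
    subst hx
    rcases hy : PySem.List.max? ys (fun y => y) with _ | b
    · rfl
    · have hb := PySem.List.max?_mem hy
      exact absurd ((h b).mpr hb) (by simp)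
  · rcases hy : PySem.List.max? ys (fun y => y) with _ | b
    · rw [PySem.List.max?_eq_none_iff] at hy
      subst hy
      exact absurd ((h a).mp (PySem.List.max?_mem hx)) (by simp)
    · have hab : a ≤ b := PySem.List.max?_isMax hy a ((h a).mp (PySem.List.max?_mem hx))
      have hba : b ≤ a := PySem.List.max?_isMax hx b ((h b).mpr (PySem.List.max?_mem hy))
      rw [le_antisymm hab hba]

-- ===== VERDICT (by name: the statement is the Claim_ definition above) =====
theorem maximize_spec : Claim_equal_maximize := by
  intro m sets _ hpre
  obtain ⟨hm, hne, hall⟩ := hpre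
  unfold Spec_maximize
  match sets with
  | [] => exact absurd rfl hne
  | s0 :: rest =>
    simp only [maximize, maximize_alt]
    have hs0 : s0 ≠ [] := hall s0 (List.mem_cons_self)
    have hrest : ∀ s ∈ rest, s ≠ [] := fun s hs => hall s (List.mem_cons_of_mem _ hs)
    rw [maximizeCalculate_eq rest s0 hs0 hrest]
    refine congrArg (fun o : Option Int => o.getD 0) ?_
    apply max?_ext
    intro x
    have hR : ∀ x, x ∈ PySem.Set.ofList (s0.map (fun e => PySem.Int.mod e m)) ↔
        ∃ n ∈ s0, x = PySem.Int.mod n m := by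
      intro y
      rw [PySem.Set.mem_ofList]
      simp only [List.mem_map]
      constructor
      · rintro ⟨n, hn, rfl⟩; exact ⟨n, hn, rfl⟩
      · rintro ⟨n, hn, rfl⟩; exact ⟨n, hn, rfl⟩
    have hmem := mem_resFold hm rest _ s0 hR x
    constructor
    · intro hx
      obtain ⟨n, hn, rfl⟩ := List.mem_map.mp hx
      exact hmem.mpr ⟨n, hn, rfl⟩
    · intro hx
      obtain ⟨n, hn, rfl⟩ := hmem.mp hx
      exact List.mem_map.mpr ⟨n, hn, rfl⟩
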